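-- pv_equiv track=rewrite | github.com/praxidike97/map-coloring | python/csp_backtracking.py | arc_reduce
-- ===== SOURCE A (Python) =====
-- def arc_reduce(binary_constraint, domain_x, domain_y):
--     change = False
--     value_y_found = False
--     new_domain_x = []
--
--     for value_x in domain_x:
--         for value_y in domain_y:
--             if value_x != value_y:
--                 value_y_found = True
--                 break
--
--         if value_y_found:
--             new_domain_x.append(value_x)
--         else:
--             change = True
--
--         value_y_found = False
--
--     return change, new_domain_x
-- ===== SOURCE B (Python) =====
-- def arc_reduce(binary_constraint, domain_x, domain_y):
--     distinct = set(domain_y)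
--     if len(distinct) >= 2:
--         # some y differs from any x, so every x survives
--         return False, list(domain_x)
--     if len(distinct) == 1:
--         (v,) = distinct
--         return any(x == v for x in domain_x), [x for x in domain_x if x != v]
--     # empty domain_y: no supporting y for any x
--     return len(domain_x) > 0, []
-- ===== Notes on version B (the rewrite author's own statement) =====
-- stated objective: faster
-- what changed: B summarises domain_y into its set of distinct values once and branches on whether that set has >=2, exactly 1, or 0 elements, instead of A's per-x inner scan over domain_y with a break flag.
import Mathlib
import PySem

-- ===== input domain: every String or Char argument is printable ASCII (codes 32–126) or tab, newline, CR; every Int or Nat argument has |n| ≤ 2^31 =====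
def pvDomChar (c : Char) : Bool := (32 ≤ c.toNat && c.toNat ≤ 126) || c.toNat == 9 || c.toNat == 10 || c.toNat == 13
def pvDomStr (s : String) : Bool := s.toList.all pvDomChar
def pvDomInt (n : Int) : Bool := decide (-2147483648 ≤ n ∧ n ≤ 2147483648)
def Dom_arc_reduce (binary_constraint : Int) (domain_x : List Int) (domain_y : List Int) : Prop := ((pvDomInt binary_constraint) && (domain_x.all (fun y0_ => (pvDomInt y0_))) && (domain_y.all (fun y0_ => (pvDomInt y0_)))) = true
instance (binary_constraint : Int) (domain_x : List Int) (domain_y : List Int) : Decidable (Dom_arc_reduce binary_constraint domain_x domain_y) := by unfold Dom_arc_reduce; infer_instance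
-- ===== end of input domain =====

-- B replaces A's per-x inner scan of domain_y by one precomputed set of domain_y's
-- distinct values and a three-way branch on its size (simpler decomposition).


-- ===== PORT A =====
-- inner 'for value_y in domain_y: if value_x != value_y: value_y_found = True; break'
def arcFind (x : Int) : List Int → Bool
  | [] => false
  | y :: ys => if x ≠ y then true else arcFind x ys

-- outer loop over domain_x carrying (change, new_domain_x)
def arcLoop (dy : List Int) : List Int → Bool → List Int → Bool × List Int
  | [], change, acc => (change, acc)
  | x :: xs, change, acc =>
      if arcFind x dy then arcLoop dy xs change (acc ++ [x])
      else arcLoop dy xs true acc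

def arc_reduce (binary_constraint : Int) (domain_x : List Int) (domain_y : List Int) : Bool × List Int :=
  arcLoop domain_y domain_x false []

-- ===== PORT B =====
def arc_reduce_alt (binary_constraint : Int) (domain_x : List Int) (domain_y : List Int) : Bool × List Int :=
  let distinct : PySem.Set Int := PySem.Set.ofList domain_y
  if 2 ≤ distinct.length then (false, domain_x)
  else match distinct with
    | [v] => (domain_x.any (fun x => x == v), domain_x.filter (fun x => !(x == v)))
    | _ => (decide (0 < domain_x.length), [])

-- ===== PRECONDITION & SPEC =====
def Spec_arc_reduce (binary_constraint : Int) (domain_x : List Int) (domain_y : List Int) (out : Bool × List Int) : Prop := out = arc_reduce_alt binary_constraint domain_x domain_y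
instance (binary_constraint : Int) (domain_x : List Int) (domain_y : List Int) (out : Bool × List Int) : Decidable (Spec_arc_reduce binary_constraint domain_x domain_y out) := by unfold Spec_arc_reduce; infer_instance

-- ===== CLAIM (what is proved, stated in full; the proofs are below) =====
def Claim_equal_arc_reduce : Prop := ∀ (binary_constraint : Int) (domain_x : List Int) (domain_y : List Int), Dom_arc_reduce binary_constraint domain_x domain_y → Spec_arc_reduce binary_constraint domain_x domain_y (arc_reduce binary_constraint domain_x domain_y)

-- ===== LEMMAS AND PROOFS =====
lemma arcLoop_eq (dy xs : List Int) (ch : Bool) (acc : List Int) :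
    arcLoop dy xs ch acc =
      (ch || xs.any (fun x => !arcFind x dy), acc ++ xs.filter (fun x => arcFind x dy)) := by
  induction xs generalizing ch acc with
  | nil => simp [arcLoop]
  | cons x xs ih =>
      by_cases h : arcFind x dy = true <;>
        simp [arcLoop, h, ih]

lemma arcFind_of_exists (x : Int) (dy : List Int) (h : ∃ y ∈ dy, x ≠ y) : arcFind x dy = true := by
  induction dy with
  | nil => simp at h
  | cons y ys ih =>
      rcases h with ⟨z, hz, hne⟩
      rcases List.mem_cons.mp hz with rfl | hz
      · simp [arcFind, hne]
      · by_cases hxy : x = y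
        · simpa [arcFind, hxy] using ih ⟨z, hz, hne⟩
        · simp [arcFind, hxy]

lemma arcFind_all_self (x : Int) (dy : List Int) (h : ∀ y ∈ dy, y = x) : arcFind x dy = false := by
  induction dy with
  | nil => rfl
  | cons y ys ih =>
      have hy : y = x := h y (by simp)
      simp [arcFind, hy]
      exact ih (fun z hz => h z (by simp [hz]))

lemma arcFind_single (x v : Int) (dy : List Int) (hne : dy ≠ [])
    (h : ∀ y ∈ dy, y = v) : arcFind x dy = !(x == v) := by
  cases dy with
  | nil => exact absurd rfl hne
  | cons y ys =>
      have hy : y = v := h y (by simp)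
      by_cases hxv : x = v
      · subst hxv
        simp [arcFind, hy]
        exact arcFind_all_self x ys (fun z hz => (h z (by simp [hz])).trans hy.symm ▸ h z (by simp [hz]))
      · simp [arcFind, hy, hxv]

-- ===== VERDICT (by name: the statement is the Claim_ definition above) =====
theorem arc_reduce_spec : Claim_equal_arc_reduce := by
  intro bc dx dy _
  unfold Spec_arc_reduce arc_reduce arc_reduce_alt
  rw [arcLoop_eq]
  rcases hs : PySem.Set.ofList dy with _ | ⟨v, _ | ⟨w, rest⟩⟩
  · -- distinct set empty ⇒ dy = []
    have hdy : dy = [] := by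
      cases dy with
      | nil => rfl
      | cons y ys =>
          have : y ∈ PySem.Set.ofList (y :: ys) := (PySem.Set.mem_ofList _ _).mpr (by simp)
          rw [hs] at this; simp at this
    subst hdy
    simp [arcFind]
    cases dx <;> simp
  · -- exactly one distinct value v
    have hmem : ∀ y ∈ dy, y = v := by
      intro y hy
      have : y ∈ PySem.Set.ofList dy := (PySem.Set.mem_ofList _ _).mpr hy
      rw [hs] at this; simpa using this
    have hne : dy ≠ [] := by
      intro h; rw [h] at hs; simp [PySem.Set.ofList] at hs
    have hf : ∀ x : Int, arcFind x dy = !(x == v) := fun x => arcFind_single x v dy hne hmem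
    simp [hf]
  · -- at least two distinct values: every x survives
    have hv : v ∈ dy := (PySem.Set.mem_ofList _ _).mp (by rw [hs]; simp)
    have hw : w ∈ dy := (PySem.Set.mem_ofList _ _).mp (by rw [hs]; simp)
    have hnd : (PySem.Set.ofList dy).Nodup := PySem.Set.nodup_ofList dy
    rw [hs] at hnd
    have hvw : v ≠ w := by
      intro h; subst h; simp at hnd
    have hf : ∀ x : Int, arcFind x dy = true := by
      intro x
      by_cases hxv : x = v
      · exact arcFind_of_exists x dy ⟨w, hw, by simp [hxv, hvw]⟩
      · exact arcFind_of_exists x dy ⟨v, hv, hxv⟩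
    simp [hf]
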